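-- pv_equiv track=rewrite | github.com/SaiPanneerselvam/PyMacChg | main.py | parse_networksetup
-- ===== SOURCE A (Python) =====
-- def parse_networksetup(text):
--     """Parse networksetup output into a list of interfaces."""
--     interfaces = []
--     current = {}
--     for line in text.splitlines():
--         if line.startswith("Hardware Port:"):
--             if current:
--                 interfaces.append(current)
--             current = {"Hardware Port": line.split(":", 1)[1].strip()}
--         elif line.startswith("Device:"):
--             current["Device"] = line.split(":", 1)[1].strip()
--         elif line.startswith("Ethernet Address:"):
--             current["Ethernet Address"] = line.split(":", 1)[1].strip()
--     if current:
--         interfaces.append(current)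
--     return interfaces
-- ===== SOURCE B (Python) =====
-- _PREFIXES = (("Hardware Port", "Hardware Port:"),
--              ("Device", "Device:"),
--              ("Ethernet Address", "Ethernet Address:"))
--
--
-- def _block_to_dict(block):
--     d = {}
--     for line in block:
--         for key, prefix in _PREFIXES:
--             if line.startswith(prefix):
--                 d[key] = line.split(":", 1)[1].strip()
--                 break
--     return d
--
--
-- def parse_networksetup(text):
--     """Split the lines into record blocks at 'Hardware Port:' markers, then map each block to a dict."""
--     blocks = []
--     cur = []
--     for line in text.splitlines():
--         if line.startswith("Hardware Port:"):
--             blocks.append(cur)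
--             cur = [line]
--         else:
--             cur.append(line)
--     blocks.append(cur)
--     dicts = [_block_to_dict(b) for b in blocks]
--     return [d for d in dicts if d]
-- ===== Notes on version B (the rewrite author's own statement) =====
-- stated objective: alternative
-- what changed: Replaces A's single interleaved loop carrying a current-dict accumulator by a two-phase decomposition: first split the lines into record blocks at 'Hardware Port:' markers (keeping pre-marker lines as an initial block), then map each block to a dict via a data-driven prefix table and keep the non-empty dicts.
import Mathlib
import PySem

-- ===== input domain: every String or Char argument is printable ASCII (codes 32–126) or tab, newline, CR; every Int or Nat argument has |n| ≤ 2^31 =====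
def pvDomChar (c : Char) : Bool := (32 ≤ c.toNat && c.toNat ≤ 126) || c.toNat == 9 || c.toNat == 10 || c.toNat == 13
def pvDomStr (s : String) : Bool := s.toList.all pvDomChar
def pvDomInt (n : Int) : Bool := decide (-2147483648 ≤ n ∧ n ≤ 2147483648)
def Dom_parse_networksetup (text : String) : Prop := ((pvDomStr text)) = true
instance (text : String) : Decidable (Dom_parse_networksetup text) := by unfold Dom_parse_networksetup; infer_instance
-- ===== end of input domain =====

-- B splits the lines into record blocks at 'Hardware Port:' markers and then maps each block to its
-- dict; same output as A's single interleaved loop (alternative decomposition, same cost).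

-- line.split(":", 1)[1].strip() — in both programs this is evaluated only under a startswith guard
-- whose prefix ends in ':', so the split always yields two pieces and pyGet? is some (.getD "" unreachable).
def pvTail (line : String) : String :=
  PySem.Str.strip ((((PySem.Str.splitMax? line ":" 1)).bind
    (fun ps => PySem.List.pyGet? ps 1)).getD "")

-- ===== PORT A =====
def pvStepA (st : List (List (String × String)) × PySem.Dict String String) (line : String) :
    List (List (String × String)) × PySem.Dict String String :=
  if PySem.Str.startswith line "Hardware Port:" then
    ((if st.2.items ≠ [] then st.1 ++ [st.2.items] else st.1),
     (PySem.Dict.empty).insert "Hardware Port" (pvTail line))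
  else if PySem.Str.startswith line "Device:" then
    (st.1, st.2.insert "Device" (pvTail line))
  else if PySem.Str.startswith line "Ethernet Address:" then
    (st.1, st.2.insert "Ethernet Address" (pvTail line))
  else st

def parse_networksetup (text : String) : List (List (String × String)) :=
  let r := (PySem.Str.splitlines text).foldl pvStepA ([], PySem.Dict.empty)
  if r.2.items ≠ [] then r.1 ++ [r.2.items] else r.1

-- ===== PORT B =====
def pvPrefixes : List (String × String) :=
  [("Hardware Port", "Hardware Port:"), ("Device", "Device:"),
   ("Ethernet Address", "Ethernet Address:")]

-- inner for-loop over _PREFIXES with break = find? of the first matching prefix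
def pvBlockStep (d : PySem.Dict String String) (line : String) : PySem.Dict String String :=
  match pvPrefixes.find? (fun kp => PySem.Str.startswith line kp.2) with
  | some kp => d.insert kp.1 (pvTail line)
  | none => d

def pvBlockToDict (block : List String) : PySem.Dict String String :=
  block.foldl pvBlockStep PySem.Dict.empty

def pvSplitStep (st : List (List String) × List String) (line : String) :
    List (List String) × List String :=
  if PySem.Str.startswith line "Hardware Port:" then (st.1 ++ [st.2], [line])
  else (st.1, st.2 ++ [line])

def parse_networksetup_alt (text : String) : List (List (String × String)) :=
  let r := (PySem.Str.splitlines text).foldl pvSplitStep ([], [])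
  let blocks := r.1 ++ [r.2]
  let dicts := blocks.map pvBlockToDict
  ((dicts.filter (fun d => d.items ≠ [])).map (fun d => d.items))

-- ===== PRECONDITION & SPEC =====
def Spec_parse_networksetup (text : String) (out : List (List (String × String))) : Prop := out = parse_networksetup_alt text
instance (text : String) (out : List (List (String × String))) : Decidable (Spec_parse_networksetup text out) := by unfold Spec_parse_networksetup; infer_instance

-- ===== CLAIM (what is proved, stated in full; the proofs are below) =====
def Claim_equal_parse_networksetup : Prop := ∀ (text : String), Dom_parse_networksetup text → Spec_parse_networksetup text (parse_networksetup text)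

-- ===== LEMMAS AND PROOFS =====

-- B's final map/filter of the block dicts, as a function of the block list
def pvFinish (blks : List (List String)) : List (List (String × String)) :=
  (((blks.map pvBlockToDict).filter (fun d => d.items ≠ [])).map (fun d => d.items))

theorem pvFinish_append_singleton (blks : List (List String)) (cb : List String) :
    pvFinish (blks ++ [cb]) =
      (if (pvBlockToDict cb).items ≠ [] then pvFinish blks ++ [(pvBlockToDict cb).items]
       else pvFinish blks) := by
  simp only [pvFinish, List.map_append, List.filter_append, List.map_cons, List.map_nil]
  by_cases h : (pvBlockToDict cb).items = [] <;> simp [h]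

-- on a non-marker line, A's step is exactly B's per-block step (state list untouched)
theorem pvStepA_of_not_hp (ifs : List (List (String × String))) (d : PySem.Dict String String)
    (line : String) (h : PySem.Str.startswith line "Hardware Port:" = false) :
    pvStepA (ifs, d) line = (ifs, pvBlockStep d line) := by
  have h' := h
  simp at h'
  cases hD : PySem.Str.startswith line "Device:" <;>
    cases hE : PySem.Str.startswith line "Ethernet Address:" <;>
      simp at hD hE <;>
        simp [pvStepA, pvBlockStep, pvPrefixes, List.find?, h', hD, hE]

-- on a marker line, B's per-block step from the empty dict builds A's fresh dict
theorem pvBlockToDict_marker (line : String)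
    (h : PySem.Str.startswith line "Hardware Port:" = true) :
    pvBlockToDict [line] = (PySem.Dict.empty).insert "Hardware Port" (pvTail line) := by
  have h' := h
  simp at h'
  simp [pvBlockToDict, pvBlockStep, pvPrefixes, h']

-- main invariant: A's fold from (pvFinish blks, dict of the current block) tracks B's block split
theorem pv_invariant (lines : List String) (blks : List (List String)) (cb : List String) :
    lines.foldl pvStepA (pvFinish blks, pvBlockToDict cb) =
      (pvFinish (lines.foldl pvSplitStep (blks, cb)).1,
       pvBlockToDict (lines.foldl pvSplitStep (blks, cb)).2) := by
  induction lines generalizing blks cb with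
  | nil => rfl
  | cons line rest ih =>
    by_cases h : PySem.Str.startswith line "Hardware Port:" = true
    · have hA : pvStepA (pvFinish blks, pvBlockToDict cb) line =
          (pvFinish (blks ++ [cb]), pvBlockToDict [line]) := by
        simp only [pvStepA, h, if_true, pvFinish_append_singleton, pvBlockToDict_marker line h]
      have hc := h
      simp at hc
      have hB : pvSplitStep (blks, cb) line = (blks ++ [cb], [line]) := by
        simp [pvSplitStep, hc]
      simp only [List.foldl_cons, hA, hB]
      exact ih (blks ++ [cb]) [line]
    · have h' : PySem.Str.startswith line "Hardware Port:" = false := by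
        simpa using h
      have hA := pvStepA_of_not_hp (pvFinish blks) (pvBlockToDict cb) line h'
      have hcb : pvBlockToDict (cb ++ [line]) = pvBlockStep (pvBlockToDict cb) line := by
        simp [pvBlockToDict]
      have hc := h'
      simp at hc
      have hB : pvSplitStep (blks, cb) line = (blks, cb ++ [line]) := by
        simp [pvSplitStep, hc]
      simp only [List.foldl_cons, hA, ← hcb, hB]
      exact ih blks (cb ++ [line])

-- ===== VERDICT (by name: the statement is the Claim_ definition above) =====
theorem parse_networksetup_spec : Claim_equal_parse_networksetup := by
  intro text _
  unfold Spec_parse_networksetup parse_networksetup parse_networksetup_alt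
  have h := pv_invariant (PySem.Str.splitlines text) [] []
  have h0 : pvFinish [] = ([] : List (List (String × String))) := rfl
  have h1 : pvBlockToDict [] = PySem.Dict.empty := rfl
  rw [h0, h1] at h
  simp only [h]
  split <;> rename_i hc <;> simp [pvFinish, hc]
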